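-- pv_equiv track=rewrite | github.com/Azkellas/adventofcode | 2019/4/answer2.py | hasDouble
-- ===== SOURCE A (Python) =====
-- def hasDouble(s):
--     i = 0
--     while i < len(s) - 1:
--         if s[i] == s[i+1]:
--             if i == len(s) - 2 or s[i] != s[i+2]:
--                 return True
--             c = s[i]
--             while s[i] == c and i < len(s) - 1:
--                 i += 1
--         else:
--             i += 1
--     return False
-- ===== SOURCE B (Python) =====
-- def hasDouble(s):
--     runs = []
--     for ch in s:
--         if runs and runs[-1][0] == ch:
--             runs[-1] = (ch, runs[-1][1] + 1)
--         else:
--             runs.append((ch, 1))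
--     return any(n == 2 for _, n in runs)
-- ===== Notes on version B (the rewrite author's own statement) =====
-- stated objective: idiomatic
-- what changed: Replaces A's manual index scan with two-char lookahead and run-skipping inner while loop by a run-length-encoding pass that builds the list of (char, run length) groups and then checks whether any run has length exactly 2.
import Mathlib
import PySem

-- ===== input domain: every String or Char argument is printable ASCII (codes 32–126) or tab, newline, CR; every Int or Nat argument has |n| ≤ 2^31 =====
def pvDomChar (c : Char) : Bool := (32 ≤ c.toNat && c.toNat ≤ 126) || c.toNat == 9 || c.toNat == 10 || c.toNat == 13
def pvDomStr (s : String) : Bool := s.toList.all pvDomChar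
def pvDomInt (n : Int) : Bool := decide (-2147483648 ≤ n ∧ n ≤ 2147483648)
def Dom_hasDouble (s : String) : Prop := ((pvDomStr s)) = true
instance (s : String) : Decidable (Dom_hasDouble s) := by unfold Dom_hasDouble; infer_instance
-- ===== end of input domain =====

-- B replaces A's index scan with run-skipping by a run-length-encoding pass followed by a
-- membership check for a run of length exactly 2 (idiomatic; same cost).

-- ===== PORT A =====
-- inner while loop of A: `while s[i] == c and i < len(s) - 1: i += 1`
def skipA (l : List Char) (c : Char) (i : Nat) : Nat :=
  if h : l.getD i ' ' = c ∧ i < l.length - 1 then skipA l c (i + 1) else i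
termination_by l.length - i
decreasing_by omega

-- `j ≤ skipA l c j`, needed for goA's termination
theorem skipA_ge (l : List Char) (c : Char) (i : Nat) : i ≤ skipA l c i := by
  fun_induction skipA with
  | case1 i h ih => omega
  | case2 i h => omega

theorem skipA_gt (l : List Char) (c : Char) (i : Nat)
    (h1 : l.getD i ' ' = c) (h2 : i < l.length - 1) : i < skipA l c i := by
  rw [skipA, dif_pos ⟨h1, h2⟩]
  have := skipA_ge l c (i + 1)
  omega

-- outer while loop of A, state = index i
def goA (l : List Char) (i : Nat) : Bool :=
  if h : i < l.length - 1 then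
    if h1 : l.getD i ' ' = l.getD (i + 1) ' ' then
      if i = l.length - 2 ∨ l.getD i ' ' ≠ l.getD (i + 2) ' ' then true
      else goA l (skipA l (l.getD i ' ') i)
    else goA l (i + 1)
  else false
termination_by l.length - i
decreasing_by
  · have := skipA_gt l (l.getD i ' ') i rfl h
    omega
  · omega

def hasDouble (s : String) : Bool := goA s.toList 0

-- ===== PORT B =====
-- one step of B's for-loop: extend the last run or start a new one
def stepB (runs : List (Char × Nat)) (ch : Char) : List (Char × Nat) :=
  match runs.getLast? with
  | some (c, n) => if c = ch then runs.dropLast ++ [(ch, n + 1)] else runs ++ [(ch, 1)]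
  | none => runs ++ [(ch, 1)]

def hasDouble_alt (s : String) : Bool :=
  (s.toList.foldl stepB []).any (fun p => p.2 == 2)

-- ===== PRECONDITION & SPEC =====
def Spec_hasDouble (s : String) (out : Bool) : Prop := out = hasDouble_alt s
instance (s : String) (out : Bool) : Decidable (Spec_hasDouble s out) := by unfold Spec_hasDouble; infer_instance

-- ===== CLAIM (what is proved, stated in full; the proofs are below) =====
def Claim_equal_hasDouble : Prop := ∀ (s : String), Dom_hasDouble s → Spec_hasDouble s (hasDouble s)

-- ===== LEMMAS AND PROOFS =====

-- (number of leading c's of t, remainder after them)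
def spanB (c : Char) : List Char → Nat × List Char
  | [] => (0, [])
  | x :: xs => if x = c then ((spanB c xs).1 + 1, (spanB c xs).2) else (0, x :: xs)

theorem spanB_len (c : Char) (t : List Char) : (spanB c t).2.length ≤ t.length := by
  induction t with
  | nil => simp [spanB]
  | cons x xs ih =>
    by_cases h : x = c <;> simp [spanB, h] <;> try omega

-- run-length decomposition
def rleFrom (l : List Char) : List (Char × Nat) :=
  match l with
  | [] => []
  | c :: t => (c, (spanB c t).1 + 1) :: rleFrom (spanB c t).2
termination_by l.length
decreasing_by
  simp only [List.length_cons]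
  exact Nat.lt_succ_of_le (spanB_len _ _)

def G (l : List Char) : Bool := (rleFrom l).any (fun p => p.2 == 2)

theorem foldl_stepB (t : List Char) (rs : List (Char × Nat)) (c : Char) (n : Nat) :
    t.foldl stepB (rs ++ [(c, n)]) =
      rs ++ (c, n + (spanB c t).1) :: rleFrom (spanB c t).2 := by
  induction t generalizing rs c n with
  | nil => simp [spanB, rleFrom]
  | cons x xs ih =>
    by_cases h : x = c
    · have hs : stepB (rs ++ [(c, n)]) x = rs ++ [(c, n + 1)] := by
        simp [stepB, h]
      rw [List.foldl_cons, hs, ih]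
      simp [spanB, h]
      omega
    · have hs : stepB (rs ++ [(c, n)]) x = (rs ++ [(c, n)]) ++ [(x, 1)] := by
        have : c ≠ x := fun hh => h hh.symm
        simp [stepB, this]
      rw [List.foldl_cons, hs, ih]
      simp [spanB, h, rleFrom]
      omega

theorem alt_eq_G (l : List Char) : (l.foldl stepB []).any (fun p => p.2 == 2) = G l := by
  cases l with
  | nil => simp [G, rleFrom]
  | cons c t =>
    have h0 : stepB [] c = [] ++ [(c, 1)] := by simp [stepB]
    rw [List.foldl_cons, h0, foldl_stepB]
    simp [G, rleFrom, Nat.add_comm]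

-- characterization of the inner while loop: it skips a block of c's, stopping at the
-- first non-c position or at the last index
theorem skipA_spec_fuel (l : List Char) (c : Char) :
    ∀ n i, l.length - i ≤ n → i < l.length → l.getD i ' ' = c →
      skipA l c i ≤ l.length - 1 ∧
      l.drop i = List.replicate (skipA l c i - i) c ++ l.drop (skipA l c i) ∧
      (skipA l c i = l.length - 1 ∨ l.getD (skipA l c i) ' ' ≠ c) := by
  intro n
  induction n with
  | zero => intro i hn hi hc; omega
  | succ n IH =>
    intro i hn hi hc
    by_cases hlt : i < l.length - 1
    · rw [skipA, dif_pos ⟨hc, hlt⟩]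
      have hi1 : i + 1 < l.length := by omega
      have hdrop : l.drop i = l.getD i ' ' :: l.drop (i + 1) := by
        rw [List.getD_eq_getElem l ' ' hi, List.drop_eq_getElem_cons hi]
      by_cases hc1 : l.getD (i + 1) ' ' = c
      · obtain ⟨h1, h2, h3⟩ := IH (i + 1) (by omega) hi1 hc1
        have hge : i + 1 ≤ skipA l c (i + 1) := skipA_ge l c (i + 1)
        refine ⟨h1, ?_, h3⟩
        rw [hdrop, hc, h2]
        have hk : skipA l c (i + 1) - i = (skipA l c (i + 1) - (i + 1)) + 1 := by omega
        rw [hk, List.replicate_succ]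
        simp
      · rw [skipA, dif_neg (fun hh => hc1 hh.1)]
        refine ⟨by omega, ?_, Or.inr hc1⟩
        rw [hdrop, hc]
        have hrep : i + 1 - i = 1 := by omega
        rw [hrep]
        simp
    · rw [skipA, dif_neg (fun hh => hlt hh.2)]
      exact ⟨by omega, by simp, Or.inl (by omega)⟩

theorem skipA_spec (l : List Char) (c : Char) (i : Nat) (hi : i < l.length)
    (hc : l.getD i ' ' = c) :
      skipA l c i ≤ l.length - 1 ∧
      l.drop i = List.replicate (skipA l c i - i) c ++ l.drop (skipA l c i) ∧
      (skipA l c i = l.length - 1 ∨ l.getD (skipA l c i) ' ' ≠ c) :=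
  skipA_spec_fuel l c (l.length - i) i (by omega) hi hc

theorem spanB_replicate (c : Char) (k : Nat) (r : List Char) :
    spanB c (List.replicate k c ++ r) = (k + (spanB c r).1, (spanB c r).2) := by
  induction k with
  | zero => simp
  | succ k ih => simp [List.replicate_succ, spanB, ih]; omega

theorem G_nil : G [] = false := by simp [G, rleFrom]

theorem G_single (x : Char) : G [x] = false := by
  simp [G, rleFrom, spanB]

-- main correspondence: A's scan from index i computes B's answer on the suffix
theorem goA_eq_G (l : List Char) : ∀ n i, l.length - i ≤ n → goA l i = G (l.drop i) := by
  intro n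
  induction n with
  | zero =>
    intro i hn
    rw [goA, dif_neg (by omega)]
    have : l.drop i = [] := by
      apply List.drop_eq_nil_of_le; omega
    rw [this, G_nil]
  | succ n IH =>
    intro i hn
    by_cases hlt : i < l.length - 1
    · have hi : i < l.length := by omega
      have hi1 : i + 1 < l.length := by omega
      set a := l.getD i ' ' with ha
      have hdropi : l.drop i = a :: l.drop (i + 1) := by
        rw [ha, List.getD_eq_getElem l ' ' hi, List.drop_eq_getElem_cons hi]
      have hdropi1 : l.drop (i + 1) = l.getD (i + 1) ' ' :: l.drop (i + 2) := by
        rw [List.getD_eq_getElem l ' ' hi1, List.drop_eq_getElem_cons hi1]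
      rw [goA, dif_pos hlt]
      by_cases h1 : a = l.getD (i + 1) ' '
      · rw [dif_pos h1]
        by_cases h2 : i = l.length - 2 ∨ a ≠ l.getD (i + 2) ' '
        · rw [if_pos h2]
          -- B also answers true: the run at i has length exactly 2
          by_cases hend : l.length ≤ i + 2
          · have hnil : l.drop (i + 2) = [] := List.drop_eq_nil_of_le hend
            rw [hdropi, hdropi1, ← h1, hnil]
            simp [G, rleFrom, spanB]
          · have hi2 : i + 2 < l.length := by omega
            have hne : l.getD (i + 2) ' ' ≠ a := by
              rcases h2 with h2 | h2
              · omega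
              · exact fun hh => h2 hh.symm
            have hdropi2 : l.drop (i + 2) = l.getD (i + 2) ' ' :: l.drop (i + 3) := by
              rw [List.getD_eq_getElem l ' ' hi2, List.drop_eq_getElem_cons hi2]
            rw [hdropi, hdropi1, ← h1, hdropi2]
            simp only [List.getD] at hne
            simp [G, rleFrom, spanB, hne]
        · rw [if_neg h2]
          push Not at h2
          obtain ⟨h2a, h2b⟩ := h2
          -- the run at i has length ≥ 3; A skips the whole run, B's first group has length ≥ 3
          set j := skipA l a i with hj
          have hgt : i < j := skipA_gt l a i rfl hlt
          obtain ⟨hjle, hdec, hlast⟩ := skipA_spec l a i hi rfl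
          rw [← hj] at hjle hdec hlast
          have hIHj : goA l j = G (l.drop j) := IH j (by omega)
          by_cases hja : l.getD j ' ' = a
          · -- the run reaches the end of the string: both sides are false
            have hend : j = l.length - 1 := by
              rcases hlast with hend | hne
              · exact hend
              · exact absurd hja hne
            have hilen : i + 3 ≤ l.length := by omega
            have hjl : j < l.length := by omega
            have hdropj : l.drop j = [a] := by
              rw [List.drop_eq_getElem_cons hjl]
              have hnil : l.drop (j + 1) = [] := List.drop_eq_nil_of_le (by omega)
              rw [hnil, ← List.getD_eq_getElem l ' ' hjl, hja]
            rw [hIHj, hdropj, G_single]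
            have hrep : l.drop i = List.replicate (j - i + 1) a := by
              rw [hdec, hdropj, ← List.replicate_succ']
            rw [hrep]
            obtain ⟨m, hm⟩ : ∃ m, j - i + 1 = m + 3 := ⟨j - i - 2, by omega⟩
            rw [hm, List.replicate_succ]
            have hsp : spanB a (List.replicate (m + 2) a) = (m + 2, ([] : List Char)) := by
              simpa using spanB_replicate a (m + 2) []
            simp [G, rleFrom, hsp]
          · -- the run ends strictly inside the string at position j, l.getD j ≠ a
            have hj3 : i + 3 ≤ j := by
              by_contra hcon
              have : j = i + 1 ∨ j = i + 2 := by omega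
              rcases this with h' | h'
              · rw [h'] at hja; exact hja h1.symm
              · rw [h'] at hja; exact hja h2b.symm
            have hjl : j < l.length := by omega
            have hdropj : l.drop j = l.getD j ' ' :: l.drop (j + 1) := by
              rw [List.getD_eq_getElem l ' ' hjl, List.drop_eq_getElem_cons hjl]
            obtain ⟨m, hm⟩ : ∃ m, j - i = m + 1 := ⟨j - i - 1, by omega⟩
            have hdec' : l.drop i = a :: (List.replicate m a ++ l.drop j) := by
              rw [hdec, hm, List.replicate_succ]; simp
            have hja' := hja
            simp only [List.getD] at hja'
            have hsp : spanB a (List.replicate m a ++ l.drop j) = (m, l.drop j) := by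
              rw [spanB_replicate, hdropj]
              simp [spanB, hja']
            rw [hIHj, hdec']
            have hm1 : m ≠ 1 := by omega
            simp [G, rleFrom, hsp, hm1]
      · rw [dif_neg h1]
        have := IH (i + 1) (by omega)
        rw [this, hdropi, hdropi1]
        have hne : l.getD (i + 1) ' ' ≠ a := fun hh => h1 hh.symm
        simp only [List.getD] at hne
        simp [G, rleFrom, spanB, hne]
    · rw [goA, dif_neg hlt]
      by_cases hl : l.length ≤ i
      · have : l.drop i = [] := List.drop_eq_nil_of_le hl
        rw [this, G_nil]
      · have hi : i < l.length := by omega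
        have hieq : i = l.length - 1 := by omega
        have : l.drop i = [l.getD i ' '] := by
          rw [List.getD_eq_getElem l ' ' hi, List.drop_eq_getElem_cons hi]
          have : l.drop (i + 1) = [] := by apply List.drop_eq_nil_of_le; omega
          rw [this]
        rw [this, G_single]

-- ===== VERDICT (by name: the statement is the Claim_ definition above) =====
theorem hasDouble_spec : Claim_equal_hasDouble := by
  intro s _
  unfold Spec_hasDouble hasDouble hasDouble_alt
  rw [goA_eq_G s.toList s.toList.length 0 (by omega)]
  rw [alt_eq_G]
  simp
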